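-- pv_equiv track=rewrite | github.com/scramblingsnail/Labridge | labridge/tools/paper/download/arxiv_download.py | _parse_user_select
-- ===== SOURCE A (Python) =====
-- from typing import List, Dict, Tuple
--
-- def _parse_user_select(user_response: str, result_num: int) -> List[int]:
-- 	r""" parse the user response to select numbers """
-- 	numbers = []
-- 	digit_stack = []
-- 	for char in user_response:
-- 		if char.isdigit():
-- 			digit_stack.append(char)
-- 		else:
-- 			if digit_stack:
-- 				number = int("".join(digit_stack))
-- 				if 0 < number <= result_num:
-- 					numbers.append(int(number))
-- 				digit_stack = []
-- 	else:
-- 		if digit_stack: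
-- 			number = int("".join(digit_stack))
-- 			if 0 < number <= result_num:
-- 				numbers.append(int(number))
-- 	return numbers
-- ===== SOURCE B (Python) =====
-- from typing import List
--
-- def _parse_user_select(user_response: str, result_num: int) -> List[int]:
--     r""" parse the user response to select numbers """
--     # phase 1: tokenize maximal runs of digits
--     runs = []
--     i = 0
--     n = len(user_response)
--     while i < n:
--         if user_response[i].isdigit():
--             j = i
--             while j < n and user_response[j].isdigit():
--                 j += 1
--             runs.append(user_response[i:j])
--             i = j
--         else:
--             i += 1
--     # phase 2: convert and filter
--     return [v for v in map(int, runs) if 0 < v <= result_num]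
-- ===== Notes on version B (the rewrite author's own statement) =====
-- stated objective: alternative
-- what changed: Replaces the interleaved accumulate-digits-and-flush single pass with a two-phase decomposition: first tokenize the string into maximal digit runs, then convert and filter them in a separate comprehension.
import Mathlib
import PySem

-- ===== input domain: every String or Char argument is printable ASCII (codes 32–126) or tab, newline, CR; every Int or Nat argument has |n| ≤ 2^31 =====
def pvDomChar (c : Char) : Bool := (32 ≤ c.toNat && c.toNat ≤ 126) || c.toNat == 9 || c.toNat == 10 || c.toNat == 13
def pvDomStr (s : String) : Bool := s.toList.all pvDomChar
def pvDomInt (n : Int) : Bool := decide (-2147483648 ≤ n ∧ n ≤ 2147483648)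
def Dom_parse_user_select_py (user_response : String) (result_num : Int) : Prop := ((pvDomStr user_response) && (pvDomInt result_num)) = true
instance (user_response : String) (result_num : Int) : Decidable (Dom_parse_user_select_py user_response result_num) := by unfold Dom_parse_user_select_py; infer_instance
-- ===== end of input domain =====

-- B replaces A's interleaved accumulate-and-flush pass by tokenize-then-filter (same cost, different decomposition).

-- int("".join(digits)) for a nonempty all-digit run; shared by both ports (both Pythons call int on such runs)
def pvVal (l : List Char) : Int := (PySem.Int.ofChars? l).getD 0

-- ===== PORT A =====
-- A's loop state: accumulated numbers and the current digit stack
def pvLoopA (m : Int) : List Char → List Int → List Char → List Int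
  | [], nums, stack =>
    if stack ≠ [] then
      let n := pvVal stack
      if 0 < n ∧ n ≤ m then nums ++ [n] else nums
    else nums
  | c :: cs, nums, stack =>
    if PySem.Chars.isdigit c then pvLoopA m cs nums (stack ++ [c])
    else if stack ≠ [] then
      let n := pvVal stack
      pvLoopA m cs (if 0 < n ∧ n ≤ m then nums ++ [n] else nums) []
    else pvLoopA m cs nums stack

def parse_user_select_py (user_response : String) (result_num : Int) : List Int :=
  pvLoopA result_num user_response.toList [] []

-- ===== PORT B =====
-- phase 1 of Source B: tokenize the maximal digit runs, in order
def pvRuns : List Char → List (List Char)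
  | [] => []
  | c :: cs =>
    if PySem.Chars.isdigit c then
      (c :: cs.takeWhile (fun d => PySem.Chars.isdigit d)) :: pvRuns (cs.dropWhile (fun d => PySem.Chars.isdigit d))
    else pvRuns cs
termination_by l => l.length
decreasing_by
  · exact Nat.lt_succ_of_le (List.length_dropWhile_le _ _)
  · exact Nat.lt_succ_self _

-- phase 2 of Source B: convert each run and keep those in range
def parse_user_select_py_alt (user_response : String) (result_num : Int) : List Int :=
  ((pvRuns user_response.toList).map pvVal).filter (fun n => decide (0 < n ∧ n ≤ result_num))

-- ===== PRECONDITION & SPEC =====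
def Spec_parse_user_select_py (user_response : String) (result_num : Int) (out : List Int) : Prop := out = parse_user_select_py_alt user_response result_num
instance (user_response : String) (result_num : Int) (out : List Int) : Decidable (Spec_parse_user_select_py user_response result_num out) := by unfold Spec_parse_user_select_py; infer_instance

-- ===== CLAIM (what is proved, stated in full; the proofs are below) =====
def Claim_equal_parse_user_select_py : Prop := ∀ (user_response : String) (result_num : Int), Dom_parse_user_select_py user_response result_num → Spec_parse_user_select_py user_response result_num (parse_user_select_py user_response result_num)

-- ===== LEMMAS AND PROOFS =====

-- keep-filter of phase 2, as a function of the run list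
def pvKeep (m : Int) (rs : List (List Char)) : List Int :=
  (rs.map pvVal).filter (fun n => decide (0 < n ∧ n ≤ m))

-- the run list of the remaining input, given the current pending digit stack
def pvConsRuns (stack cs : List Char) : List (List Char) :=
  if stack = [] then pvRuns cs
  else (stack ++ cs.takeWhile (fun d => PySem.Chars.isdigit d)) :: pvRuns (cs.dropWhile (fun d => PySem.Chars.isdigit d))

theorem pvLoopA_eq_keep (m : Int) :
    ∀ (cs : List Char) (nums : List Int) (stack : List Char),
      pvLoopA m cs nums stack = nums ++ pvKeep m (pvConsRuns stack cs) := by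
  intro cs
  induction cs with
  | nil =>
    intro nums stack
    by_cases hs : stack = []
    · simp [pvLoopA, pvConsRuns, pvKeep, hs, pvRuns]
    · simp only [pvLoopA, pvConsRuns, pvKeep, hs, ne_eq, not_false_iff, if_true,
        List.takeWhile_nil, List.dropWhile_nil, List.append_nil, pvRuns]
      by_cases hc : 0 < pvVal stack ∧ pvVal stack ≤ m <;> simp [hc]
  | cons c cs ih =>
    intro nums stack
    by_cases hd : PySem.Chars.isdigit c = true
    · rw [show pvLoopA m (c :: cs) nums stack = pvLoopA m cs nums (stack ++ [c]) by
        simp [pvLoopA, hd]]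
      rw [ih]
      congr 1
      have hne : stack ++ [c] ≠ [] := by simp
      by_cases hs : stack = []
      · simp [pvConsRuns, hs, pvRuns, hd]
      · simp [pvConsRuns, hs, hne, List.takeWhile, List.dropWhile, hd]
    · by_cases hs : stack = []
      · rw [show pvLoopA m (c :: cs) nums stack = pvLoopA m cs nums stack by
          simp [pvLoopA, hd, hs]]
        rw [ih]
        simp [pvConsRuns, hs, pvRuns, hd]
      · rw [show pvLoopA m (c :: cs) nums stack
            = pvLoopA m cs (if 0 < pvVal stack ∧ pvVal stack ≤ m then nums ++ [pvVal stack] else nums) [] by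
          simp [pvLoopA, hd, hs]]
        rw [ih]
        have : pvConsRuns stack (c :: cs) = stack :: pvRuns cs := by
          simp [pvConsRuns, hs, List.takeWhile, List.dropWhile, hd, pvRuns]
        rw [this]
        simp only [pvConsRuns, pvKeep, List.map, List.filter]
        by_cases hc : 0 < pvVal stack ∧ pvVal stack ≤ m <;> simp [hc]

-- ===== VERDICT (by name: the statement is the Claim_ definition above) =====
theorem parse_user_select_py_spec : Claim_equal_parse_user_select_py := by
  intro s m _
  unfold Spec_parse_user_select_py parse_user_select_py parse_user_select_py_alt
  rw [pvLoopA_eq_keep]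
  simp [pvConsRuns, pvKeep]
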